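-- pv_equiv track=rewrite | github.com/miliar/Code_Jam_Webscraper | Solutions_python/Problem_155/497.py | solve_test_case
-- ===== SOURCE A (Python) =====
-- def solve_test_case(S_max, S):
--     current_applause = 0
--     help_needed = 0
--     for idx in range(S_max + 1):
--         candidates = int(S[idx: idx + 1])
--         if current_applause >= idx:
--             current_applause += candidates
--         else:
--             help_needed += idx - current_applause
--             current_applause += candidates + idx - current_applause
--     return help_needed
-- ===== SOURCE B (Python) =====
-- def solve_test_case(S_max, S):
--     def feasible(k):
--         total = k
--         for j in range(S_max + 1):
--             if total < j:
--                 return False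
--             total += int(S[j: j + 1])
--         return True
--     lo = 0
--     hi = S_max if S_max > 0 else 0
--     while lo < hi:
--         mid = (lo + hi) // 2
--         if feasible(mid):
--             hi = mid
--         else:
--             lo = mid + 1
--     return lo
-- ===== Notes on version B (the rewrite author's own statement) =====
-- stated objective: alternative
-- what changed: Replaced A's one-pass greedy simulation (topping up the running applause and accumulating the gaps) with a binary search over the answer k, using a feasibility check that walks the digits to test whether k initial standing people suffice; correct because feasibility is monotone in k and A's result is exactly the minimal feasible k.
import Mathlib
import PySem

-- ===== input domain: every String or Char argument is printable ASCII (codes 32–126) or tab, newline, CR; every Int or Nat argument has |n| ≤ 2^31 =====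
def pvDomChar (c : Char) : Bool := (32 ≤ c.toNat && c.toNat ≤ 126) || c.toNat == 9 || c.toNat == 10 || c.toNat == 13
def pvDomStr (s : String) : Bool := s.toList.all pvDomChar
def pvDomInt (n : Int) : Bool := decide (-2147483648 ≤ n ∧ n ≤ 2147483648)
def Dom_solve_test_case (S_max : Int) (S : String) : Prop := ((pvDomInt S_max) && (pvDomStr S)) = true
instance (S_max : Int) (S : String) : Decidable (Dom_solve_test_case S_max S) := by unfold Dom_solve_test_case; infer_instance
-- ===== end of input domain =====

-- B replaces A's single-pass greedy top-up simulation by a binary search on the answer k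
-- with a feasibility check (can k initial people make everyone stand?); alternative algorithm, not faster.


-- ===== PORT A =====
-- one loop step of A; int(S[idx:idx+1]) = none means Python raises ValueError (outside Pre_)
def solveAStep (S : String) (st : Option (Int × Int)) (idx : Int) : Option (Int × Int) :=
  st.bind fun cw =>
    (PySem.Int.ofStr? (PySem.Str.slice S (some idx) (some (idx + 1)))).map fun candidates =>
      if cw.1 ≥ idx then (cw.1 + candidates, cw.2)
      else (cw.1 + (candidates + idx - cw.1), cw.2 + (idx - cw.1))

def solve_test_case (S_max : Int) (S : String) : Int :=
  match (PySem.List.pyRange 0 (S_max + 1) 1).foldl (solveAStep S) (some (0, 0)) with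
  | some cw => cw.2
  | none => 0    -- Python raised (excluded by Pre_)

-- ===== PORT B =====
-- B's inner `feasible(k)`: walk the indices with a running total; some false = early `return False`,
-- none = Python raised ValueError on int(S[j:j+1]) (outside Pre_)
def feasGo (S : String) (total : Int) : List Int → Option Bool
  | [] => some true
  | j :: rest =>
    if total < j then some false
    else
      match PySem.Int.ofStr? (PySem.Str.slice S (some j) (some (j + 1))) with
      | none => none
      | some c => feasGo S (total + c) rest

def feasible (S_max : Int) (S : String) (k : Int) : Option Bool :=
  feasGo S k (PySem.List.pyRange 0 (S_max + 1) 1)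

-- B's `while lo < hi` binary search; if a probe raises (none), Python raised (excluded by Pre_)
def bsearchGo (S_max : Int) (S : String) (lo hi : Int) : Int :=
  if _h : lo < hi then
    match feasible S_max S (PySem.Int.floordiv (lo + hi) 2) with
    | some true => bsearchGo S_max S lo (PySem.Int.floordiv (lo + hi) 2)
    | some false => bsearchGo S_max S (PySem.Int.floordiv (lo + hi) 2 + 1) hi
    | none => lo    -- Python raised (excluded by Pre_)
  else lo
termination_by (hi - lo).toNat
decreasing_by
  all_goals
    have hm := PySem.Int.floordiv_eq_ediv_of_pos (a := lo + hi) (b := 2) (by omega)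
    omega

def solve_test_case_alt (S_max : Int) (S : String) : Int :=
  bsearchGo S_max S 0 (if S_max > 0 then S_max else 0)

-- ===== PRECONDITION & SPEC =====
-- Pre_ excludes exactly the inputs where Python A raises ValueError:
-- some index 0..S_max is out of range of S or names a non-digit character.
def Pre_solve_test_case (S_max : Int) (S : String) : Prop :=
  S_max < 0 ∨ (S_max < (S.toList.length : Int) ∧
               (S.toList.take (S_max.toNat + 1)).all Char.isDigit = true)
instance (S_max : Int) (S : String) : Decidable (Pre_solve_test_case S_max S) := by
  unfold Pre_solve_test_case; infer_instance

def pvWitness_solve_test_case : Int × String := (4, "01121")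

def Spec_solve_test_case (S_max : Int) (S : String) (out : Int) : Prop := out = solve_test_case_alt S_max S
instance (S_max : Int) (S : String) (out : Int) : Decidable (Spec_solve_test_case S_max S out) := by unfold Spec_solve_test_case; infer_instance

-- ===== CLAIM (what is proved, stated in full; the proofs are below) =====
def Claim_equal_solve_test_case : Prop := ∀ (S_max : Int) (S : String), Dom_solve_test_case S_max S → Pre_solve_test_case S_max S → Spec_solve_test_case S_max S (solve_test_case S_max S)

-- ===== LEMMAS AND PROOFS =====

-- A's fold dies on none
theorem foldA_none (S : String) (l : List Int) :
    l.foldl (solveAStep S) none = none := by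
  induction l with
  | nil => rfl
  | cons i l ih => simpa [solveAStep] using ih

-- A's help counter never decreases
theorem foldA_mono (S : String) (l : List Int) :
    ∀ (cur help : Int) (r : Int × Int),
      l.foldl (solveAStep S) (some (cur, help)) = some r → help ≤ r.2 := by
  induction l with
  | nil =>
    intro cur help r h
    simp only [List.foldl_nil, Option.some.injEq] at h
    subst h
    exact le_rfl
  | cons j l ih =>
    intro cur help r h
    simp only [List.foldl_cons, solveAStep, Option.bind_some] at h
    cases hc : PySem.Int.ofStr? (PySem.Str.slice S (some j) (some (j + 1))) with
    | none => rw [hc] at h; simp [foldA_none] at h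
    | some c =>
      rw [hc] at h; simp only [Option.map_some] at h
      by_cases hge : cur ≥ j
      · simp only [hge, if_pos] at h
        exact ih _ _ _ h
      · simp only [hge, if_neg, not_false_iff] at h
        have := ih _ _ _ h
        omega

-- the key simulation: a feasibility walk starting at total t ≥ cur succeeds
-- exactly when t - cur + help reaches A's final help counter
theorem feas_char (S : String) (l : List Int) :
    ∀ (cur help t : Int) (r : Int × Int),
      l.foldl (solveAStep S) (some (cur, help)) = some r → cur ≤ t →
      feasGo S t l = some (decide (r.2 ≤ t - cur + help)) := by
  induction l with
  | nil =>
    intro cur help t r h ht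
    simp only [List.foldl_nil, Option.some.injEq] at h
    subst h
    simp only [feasGo, Option.some.injEq]
    symm
    rw [decide_eq_true_eq]
    omega
  | cons j l ih =>
    intro cur help t r h ht
    simp only [List.foldl_cons, solveAStep, Option.bind_some] at h
    cases hc : PySem.Int.ofStr? (PySem.Str.slice S (some j) (some (j + 1))) with
    | none => rw [hc] at h; simp [foldA_none] at h
    | some c =>
      rw [hc] at h; simp only [Option.map_some] at h
      by_cases htj : t < j
      · -- early `return False`; A's final help exceeds t - cur + help
        have hge : ¬ (r.2 ≤ t - cur + help) := by
          by_cases hcur : cur ≥ j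
          · have := foldA_mono S l _ _ _ (by simpa [hcur] using h)
            omega
          · simp only [hcur, if_neg, not_false_iff] at h
            have := foldA_mono S l _ _ _ h
            omega
        simp [feasGo, htj, hge]
      · -- walk continues with total t + c
        rw [not_lt] at htj
        by_cases hcur : cur ≥ j
        · simp only [hcur, if_pos] at h
          have := ih (cur + c) help (t + c) r h (by omega)
          simp only [feasGo, if_neg (by omega : ¬ t < j), hc]
          rw [this]
          congr 1
          simp only [decide_eq_decide]
          omega
        · simp only [hcur, if_neg, not_false_iff] at h
          have := ih (cur + (c + j - cur)) (help + (j - cur)) (t + c) r h (by omega)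
          simp only [feasGo, if_neg (by omega : ¬ t < j), hc]
          rw [this]
          congr 1
          simp only [decide_eq_decide]
          omega

-- bound used at top level: with 0 ≤ digits, j ≤ B for all j ∈ l, and help ≤ cur, A's help ends ≤ max help B
theorem foldA_le (S : String) (l : List Int) (B : Int) :
    ∀ (cur help : Int) (r : Int × Int),
      l.foldl (solveAStep S) (some (cur, help)) = some r →
      (∀ j ∈ l, j ≤ B) →
      (∀ j ∈ l, ∀ c, PySem.Int.ofStr? (PySem.Str.slice S (some j) (some (j + 1))) = some c → 0 ≤ c) →
      help ≤ cur → r.2 ≤ max help B := by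
  induction l with
  | nil =>
    intro cur help r h _ _ _
    simp only [List.foldl_nil, Option.some.injEq] at h
    subst h
    simp only [le_max_iff]
    left; exact le_rfl
  | cons j l ih =>
    intro cur help r h hB hc0 hhc
    simp only [List.foldl_cons, solveAStep, Option.bind_some] at h
    cases hc : PySem.Int.ofStr? (PySem.Str.slice S (some j) (some (j + 1))) with
    | none => rw [hc] at h; simp [foldA_none] at h
    | some c =>
      rw [hc] at h; simp only [Option.map_some] at h
      have hcge : 0 ≤ c := hc0 j (by simp) c hc
      have hjB : j ≤ B := hB j (by simp)
      by_cases hcur : cur ≥ j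
      · simp only [hcur, if_pos] at h
        exact ih _ _ _ h (fun x hx => hB x (by simp [hx])) (fun x hx => hc0 x (by simp [hx])) (by omega)
      · simp only [hcur, if_neg, not_false_iff] at h
        have := ih _ _ _ h (fun x hx => hB x (by simp [hx])) (fun x hx => hc0 x (by simp [hx])) (by omega)
        omega

-- A's fold returns a value when every index parses
theorem foldA_some (S : String) (l : List Int)
    (hp : ∀ j ∈ l, (PySem.Int.ofStr? (PySem.Str.slice S (some j) (some (j + 1)))).isSome) :
    ∀ st : Int × Int, (l.foldl (solveAStep S) (some st)).isSome := by
  induction l with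
  | nil => intro st; simp
  | cons j l ih =>
    intro st
    have := hp j (by simp)
    cases hc : PySem.Int.ofStr? (PySem.Str.slice S (some j) (some (j + 1))) with
    | none => rw [hc] at this; simp at this
    | some c =>
      simp only [List.foldl_cons, solveAStep, Option.bind_some, hc, Option.map_some]
      exact ih (fun x hx => hp x (by simp [hx])) _

-- int(<single digit character>) in PySem
theorem ofStr_digit (d : Char) (hd : d.isDigit = true) :
    PySem.Int.ofStr? (String.ofList [d]) = some ((d.toNat : Int) - 48) := by
  have hb : 48 ≤ d.toNat ∧ d.toNat ≤ 57 := by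
    simp [Char.isDigit] at hd
    obtain ⟨h1, h2⟩ := hd
    exact ⟨UInt32.le_iff_toNat_le.mp h1, UInt32.le_iff_toNat_le.mp h2⟩
  rw [← Char.ofNat_toNat d]
  have h48 := hb.1; have h57 := hb.2
  generalize d.toNat = n at h48 h57 ⊢
  interval_cases n <;> decide

-- the 1-character slice S[j:j+1] for an in-range index
theorem slice_one (S : String) (j : Int) (h0 : 0 ≤ j) (hl : j < (S.toList.length : Int)) :
    PySem.Str.slice S (some j) (some (j + 1)) =
      String.ofList [S.toList[j.toNat]'(by omega)] := by
  unfold PySem.Str.slice PySem.Chars.slice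
  rw [PySem.List.slice_toNat S.toList h0 (by omega)]
  congr 1
  have hj : j.toNat < S.toList.length := by omega
  have h1 : (j + 1).toNat - j.toNat = 1 := by omega
  rw [h1, List.drop_eq_getElem_cons hj, List.take_succ_cons, List.take_zero]

-- the binary search returns ans when feasibility is exactly (ans ≤ k) and lo ≤ ans ≤ hi
theorem bs_correct (S_max : Int) (S : String) (ans : Int)
    (hf : ∀ k, 0 ≤ k → feasible S_max S k = some (decide (ans ≤ k))) :
    ∀ (n : Nat) (lo hi : Int), (hi - lo).toNat ≤ n → 0 ≤ lo → lo ≤ ans → ans ≤ hi →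
      bsearchGo S_max S lo hi = ans := by
  intro n
  induction n with
  | zero =>
    intro lo hi hn h0 hla hah
    rw [bsearchGo]
    rw [dif_neg (by omega : ¬ lo < hi)]
    omega
  | succ n ih =>
    intro lo hi hn h0 hla hah
    rw [bsearchGo]
    by_cases hlh : lo < hi
    · rw [dif_pos hlh]
      have hm : PySem.Int.floordiv (lo + hi) 2 = (lo + hi) / 2 :=
        PySem.Int.floordiv_eq_ediv_of_pos (by omega)
      rw [hf _ (by omega)]
      by_cases hle : ans ≤ PySem.Int.floordiv (lo + hi) 2
      · simp only [hle, decide_true]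
        exact ih lo _ (by omega) h0 hla hle
      · simp only [hle, decide_false]
        exact ih _ hi (by omega) (by omega) (by omega) hah
    · rw [dif_neg hlh]
      omega

-- ===== VERDICT (by name: the statement is the Claim_ definition above) =====
theorem solve_test_case_spec : Claim_equal_solve_test_case := by
  intro S_max S _ hpre
  unfold Spec_solve_test_case solve_test_case solve_test_case_alt
  by_cases hS0 : S_max < 0
  · -- empty range: A returns 0, B's search interval is [0, 0]
    rw [PySem.List.pyRange_one_eq_nil (by omega), bsearchGo]
    rw [if_neg (by omega : ¬ S_max > 0)]
    rw [dif_neg (by omega : ¬ (0:Int) < 0)]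
    rfl
  · rw [not_lt] at hS0
    have hlen : S_max < (S.toList.length : Int) := by
      rcases hpre with h | ⟨h, -⟩ <;> omega
    have hdig : (S.toList.take (S_max.toNat + 1)).all Char.isDigit = true := by
      rcases hpre with h | ⟨-, h⟩
      · omega
      · exact h
    -- every index 0..S_max parses to a digit value in [0, 9]
    have hparse : ∀ j ∈ PySem.List.pyRange 0 (S_max + 1) 1, ∃ c : Int,
        PySem.Int.ofStr? (PySem.Str.slice S (some j) (some (j + 1))) = some c ∧ 0 ≤ c ∧ c ≤ 9 := by
      intro j hj
      rw [PySem.List.mem_pyRange_one] at hj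
      obtain ⟨hj0, hj1⟩ := hj
      have hjl : j < (S.toList.length : Int) := by omega
      have hjn : j.toNat < S.toList.length := by omega
      have hd : (S.toList[j.toNat]'hjn).isDigit = true := by
        have hmem : S.toList[j.toNat]'hjn ∈ S.toList.take (S_max.toNat + 1) := by
          have hjt : j.toNat < (S.toList.take (S_max.toNat + 1)).length := by
            simp only [List.length_take]
            omega
          have heq : (S.toList.take (S_max.toNat + 1))[j.toNat]'hjt = S.toList[j.toNat]'hjn :=
            List.getElem_take
          rw [← heq]
          exact List.getElem_mem _
        exact List.all_eq_true.mp hdig _ hmem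
      refine ⟨((S.toList[j.toNat]'hjn).toNat : Int) - 48, ?_, ?_⟩
      · rw [slice_one S j hj0 hjl]
        exact ofStr_digit _ hd
      · have hb : 48 ≤ (S.toList[j.toNat]'hjn).toNat ∧ (S.toList[j.toNat]'hjn).toNat ≤ 57 := by
          simp only [Char.isDigit, Bool.and_eq_true, decide_eq_true_eq] at hd
          exact ⟨UInt32.le_iff_toNat_le.mp hd.1, UInt32.le_iff_toNat_le.mp hd.2⟩
        omega
    -- A's fold returns some r
    have hsome := foldA_some S (PySem.List.pyRange 0 (S_max + 1) 1)
      (fun j hj => by obtain ⟨c, hc, -⟩ := hparse j hj; simp [hc]) (0, 0)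
    cases hA : (PySem.List.pyRange 0 (S_max + 1) 1).foldl (solveAStep S) (some (0, 0)) with
    | none => rw [hA] at hsome; simp at hsome
    | some r =>
      -- feasibility is exactly (r.2 ≤ k) for k ≥ 0
      have hfeas : ∀ k, 0 ≤ k → feasible S_max S k = some (decide (r.2 ≤ k)) := by
        intro k hk
        have := feas_char S (PySem.List.pyRange 0 (S_max + 1) 1) 0 0 k r hA hk
        simpa [feasible] using this
      -- bounds on the answer r.2
      have h0r : 0 ≤ r.2 := foldA_mono S _ 0 0 r hA
      have hrB : r.2 ≤ max 0 S_max := by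
        refine foldA_le S _ S_max 0 0 r hA ?_ ?_ le_rfl
        · intro j hj; rw [PySem.List.mem_pyRange_one] at hj; omega
        · intro j hj c hc
          obtain ⟨c', hc', hge, -⟩ := hparse j hj
          rw [hc'] at hc
          simp only [Option.some.injEq] at hc
          omega
      have hhi : (if S_max > 0 then S_max else 0) = max 0 S_max := by
        split_ifs <;> omega
      rw [hhi]
      exact (bs_correct S_max S r.2 hfeas (max 0 S_max - 0).toNat 0 (max 0 S_max)
        le_rfl le_rfl h0r (by omega)).symm
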